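-- pv_equiv track=rewrite | github.com/hugoeidem/qr | functions.py | confirmFormat
-- ===== SOURCE A (Python) =====
-- def binaryFromBitlist(bitlist):
--     out = 0
--     for bit in bitlist:
--         out = (out << 1) | bit
--     return out
--
-- def confirmFormat(format: list[int]):
--     info = binaryFromBitlist(format[0:5])
--     parity = binaryFromBitlist(format[5:15])
--
--     # x^10 + x^8 + x^5 + x^4 + x^2 + x + 1
--     # observe binary representation is 11 digits
--     generator = 0b10100110111
--
--     # pad info bits to make 15-bit sequence
--     info <<= 10
--
--     # account for beginning zeros
--     info_length = binLength(info)
--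
--     # reduce info until its the same length as the generator
--     while info_length >= 11:
--         info ^= generator << (info_length - 11) # XOR info with same length padded generator
--         info_length = binLength(info) # get calculate new length
--
--     # info should now have become equal to the input parity bits
--     return info == parity
--
-- def binLength(binary: int):
--     """
--         Returns amount of bits in binary representation
--     """
--     out = 0
--     while binary:
--         binary >>= 1
--         out += 1
--     return out
-- ===== SOURCE B (Python) =====
-- # B: no polynomial long division. Scan info LSB-first, keeping the remainder of
-- # x^i mod g(x) in a 10-bit register (basis) and XOR-accumulating it for each set
-- # bit; by GF(2) linearity the accumulator is the BCH remainder. Objective: alternative.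
-- def binaryFromBitlist(bitlist):
--     out = 0
--     for bit in bitlist:
--         out = (out << 1) | bit
--     return out
--
-- def confirmFormat(format: list[int]):
--     info = binaryFromBitlist(format[0:5]) << 10
--     parity = binaryFromBitlist(format[5:15])
--     g = 0b10100110111
--     rem = 0
--     basis = 1  # remainder of x^0 mod g
--     while info:
--         if info & 1:
--             rem ^= basis
--         info >>= 1
--         basis <<= 1
--         if basis & (1 << 10):
--             basis ^= g
--     return rem == parity
-- ===== Notes on version B (the rewrite author's own statement) =====
-- stated objective: alternative
-- what changed: A verifies the checksum by MSB-first GF(2) long division: it repeatedly recomputes the bit length (binLength helper) to find the top set bit and XOR-cancels the aligned generator until the value is short; B never divides: it scans the padded info value LSB-first, maintaining the remainder of x^i mod g(x) in a 10-bit register and XOR-accumulating that register at every set bit, which by linearity of the GF(2) remainder yields the same remainder.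
import Mathlib
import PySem

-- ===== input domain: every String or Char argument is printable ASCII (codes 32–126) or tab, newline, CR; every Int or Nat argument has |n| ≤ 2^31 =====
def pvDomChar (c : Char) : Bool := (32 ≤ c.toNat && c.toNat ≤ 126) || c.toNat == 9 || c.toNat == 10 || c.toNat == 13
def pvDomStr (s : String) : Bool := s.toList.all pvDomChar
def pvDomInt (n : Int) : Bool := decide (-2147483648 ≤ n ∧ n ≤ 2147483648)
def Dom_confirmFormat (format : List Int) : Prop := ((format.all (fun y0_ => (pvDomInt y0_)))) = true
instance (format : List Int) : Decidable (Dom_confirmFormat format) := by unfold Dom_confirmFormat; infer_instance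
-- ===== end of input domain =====

-- B replaces A's MSB-first long division (repeated top-bit search via binLength and aligned
-- generator XOR) by an LSB-first sweep that keeps the remainder of x^i mod g in a 10-bit
-- register and XOR-accumulates it at each set bit (GF(2) linearity); objective: alternative.
-- Equivalence is about return values; neither program mutates its argument.

-- ===== PORT A =====
-- shared helper (both Python implementations use the same binaryFromBitlist)
def binaryFromBitlist (bitlist : List Int) : Int :=
  bitlist.foldl (fun out bit => PySem.Int.bor (out <<< (1 : Nat)) bit) 0

-- 'while binary: binary >>= 1; out += 1' — fuel-totalised; any value reachable under
-- Dom ∧ Pre_ has < 100 bits, and Python's loop diverges for negative input (excluded by Pre_).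
def binLengthAux : Nat → Int → Int
  | 0, _ => 0
  | fuel + 1, binary => if binary ≠ 0 then binLengthAux fuel (binary >>> (1 : Nat)) + 1 else 0

def binLength (binary : Int) : Int := binLengthAux 100 binary

-- 'while info_length >= 11: …' — fuel-totalised (each pass strictly shortens info, so < 100 passes
-- suffice under Dom ∧ Pre_); shift amount (len - 11).toNat is exact under the guard 11 ≤ len.
def confirmFormatLoop : Nat → Int → Int → Int
  | 0, info, _ => info
  | fuel + 1, info, len =>
    if 11 ≤ len then
      let info' := PySem.Int.bxor info ((1335 : Int) <<< (len - 11).toNat)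
      confirmFormatLoop fuel info' (binLength info')
    else info

def confirmFormat (format : List Int) : Bool :=
  let info0 := binaryFromBitlist (PySem.List.slice format (some 0) (some 5))
  let parity := binaryFromBitlist (PySem.List.slice format (some 5) (some 15))
  let info := info0 <<< (10 : Nat)
  confirmFormatLoop 100 info (binLength info) == parity

-- ===== PORT B =====
-- 'while info: if info & 1: rem ^= basis; info >>= 1; basis <<= 1; if basis & (1<<10): basis ^= g'
-- fuel-totalised like A's loops; under Dom ∧ Pre_ the value has < 100 bits.
def sweepAux : Nat → Int → Int → Int → Int
  | 0, _, rem, _ => rem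
  | fuel + 1, info, rem, basis =>
    if info ≠ 0 then
      let rem' := if PySem.Int.band info 1 ≠ 0 then PySem.Int.bxor rem basis else rem
      let b1 := basis <<< (1 : Nat)
      let basis' := if PySem.Int.band b1 ((1 : Int) <<< (10 : Nat)) ≠ 0 then PySem.Int.bxor b1 1335 else b1
      sweepAux fuel (info >>> (1 : Nat)) rem' basis'
    else rem

def confirmFormat_alt (format : List Int) : Bool :=
  let info := binaryFromBitlist (PySem.List.slice format (some 0) (some 5)) <<< (10 : Nat)
  let parity := binaryFromBitlist (PySem.List.slice format (some 5) (some 15))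
  sweepAux 100 info 0 1 == parity

-- ===== PRECONDITION & SPEC =====
-- Pre_ excludes exactly the inputs with a negative value among the first five entries: there A's
-- binLength loop never terminates (Python hangs on 'binary >>= 1' of a negative int), so A returns
-- no value (and B's own while-loop hangs there too).
def Pre_confirmFormat (format : List Int) : Prop := ∀ x ∈ format.take 5, 0 ≤ x
instance (format : List Int) : Decidable (Pre_confirmFormat format) := by
  unfold Pre_confirmFormat; infer_instance
def pvWitness_confirmFormat : List Int := [0, 1, 0, 0, 0, 1, 0, 0, 1, 1, 0, 1, 0, 1, 0]
def Spec_confirmFormat (format : List Int) (out : Bool) : Prop := out = confirmFormat_alt format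
instance (format : List Int) (out : Bool) : Decidable (Spec_confirmFormat format out) := by
  unfold Spec_confirmFormat; infer_instance

-- ===== CLAIM (what is proved, stated in full; the proofs are below) =====
def Claim_equal_confirmFormat : Prop := ∀ (format : List Int), Dom_confirmFormat format → Pre_confirmFormat format → Spec_confirmFormat format (confirmFormat format)

-- ===== LEMMAS AND PROOFS =====

theorem pv_lt_two_pow_bl (n : Nat) : n < 2 ^ PySem.Int.bitLength (n : Int) := by
  have h := PySem.Int.lt_two_pow_bitLength (n : Int)
  simpa using h

theorem pv_two_pow_bl_le (n : Nat) (h : n ≠ 0) :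
    2 ^ (PySem.Int.bitLength (n : Int) - 1) ≤ n := by
  have h2 := PySem.Int.two_pow_bitLength_le (n : Int) (by exact_mod_cast h)
  simpa using h2

theorem pv_bl_le_iff (n : Nat) (m : Nat) :
    PySem.Int.bitLength (n : Int) ≤ m ↔ n < 2 ^ m := by
  constructor
  · intro h
    exact lt_of_lt_of_le (pv_lt_two_pow_bl n) (Nat.pow_le_pow_right (by norm_num) h)
  · intro h
    by_contra hc
    push Not at hc
    have hn : n ≠ 0 := by
      intro h0; subst h0
      simp [PySem.Int.bitLength_zero] at hc
    have := pv_two_pow_bl_le n hn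
    have hle : 2 ^ m ≤ 2 ^ (PySem.Int.bitLength (n : Int) - 1) :=
      Nat.pow_le_pow_right (by norm_num) (by omega)
    omega

theorem pv_testBit_top (n i : Nat) (h1 : 2 ^ i ≤ n) (h2 : n < 2 ^ (i + 1)) :
    n.testBit i = true := by
  by_contra hc
  have hfalse : n.testBit i = false := by simpa using hc
  have : n < 2 ^ i := by
    apply Nat.lt_pow_two_of_testBit
    intro j hj
    rcases Nat.eq_or_lt_of_le hj with rfl | hlt
    · exact hfalse
    · exact Nat.testBit_lt_two_pow
        (lt_of_lt_of_le h2 (Nat.pow_le_pow_right (by norm_num) hlt))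
  omega

theorem pv_testBit_false_lt (n i : Nat) (h : n.testBit i = false) (h2 : n < 2 ^ (i + 1)) :
    n < 2 ^ i := by
  apply Nat.lt_pow_two_of_testBit
  intro j hj
  rcases Nat.eq_or_lt_of_le hj with rfl | hlt
  · exact h
  · exact Nat.testBit_lt_two_pow (lt_of_lt_of_le h2 (Nat.pow_le_pow_right (by norm_num) hlt))

-- XORing the generator aligned at the top bit strictly shortens the number
theorem pv_xor_gen_lt (n : Nat) (h : 2 ^ 10 ≤ n) :
    n ^^^ (1335 <<< (PySem.Int.bitLength (n : Int) - 11)) <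
      2 ^ (PySem.Int.bitLength (n : Int) - 1) := by
  have hs11 : 11 ≤ PySem.Int.bitLength (n : Int) := by
    by_contra hc
    have := (pv_bl_le_iff n 10).mp (by omega)
    omega
  have hn0 : n ≠ 0 := by omega
  set s := PySem.Int.bitLength (n : Int) with hs
  apply Nat.lt_pow_two_of_testBit
  intro j hj
  rw [Nat.testBit_xor, Nat.testBit_shiftLeft]
  rcases Nat.eq_or_lt_of_le hj with hj1 | hj2
  · have htop : n.testBit j = true := by
      apply pv_testBit_top n j
      · rw [← hj1]
        exact pv_two_pow_bl_le n hn0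
      · have hlt := pv_lt_two_pow_bl n
        rw [← hs] at hlt
        have : j + 1 = s := by omega
        rw [this]
        exact hlt
    have hidx : j - (s - 11) = 10 := by omega
    have hge : j ≥ s - 11 := by omega
    have hb : Nat.testBit 1335 10 = true := by decide
    simp [htop, hidx, hge, hb]
  · have hjs : s ≤ j := by omega
    have hn : n.testBit j = false := by
      apply Nat.testBit_lt_two_pow
      exact lt_of_lt_of_le (pv_lt_two_pow_bl n) (Nat.pow_le_pow_right (by norm_num) hjs)
    have hg : Nat.testBit 1335 (j - (s - 11)) = false := by
      apply Nat.testBit_lt_two_pow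
      have h11 : 11 ≤ j - (s - 11) := by omega
      calc 1335 < 2 ^ 11 := by norm_num
        _ ≤ 2 ^ (j - (s - 11)) := Nat.pow_le_pow_right (by norm_num) h11
    simp [hn, hg]

-- the common reference: GF(2) remainder of n by the generator, computed as A computes it
def redN (n : Nat) : Nat :=
  if _h : 2 ^ 10 ≤ n then
    redN (n ^^^ (1335 <<< (PySem.Int.bitLength (n : Int) - 11)))
  else n
termination_by n
decreasing_by
  have h1 := pv_xor_gen_lt n _h
  have hn0 : n ≠ 0 := by omega
  have h2 := pv_two_pow_bl_le n hn0
  omega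

theorem redN_of_lt (n : Nat) (h : n < 2 ^ 10) : redN n = n := by
  rw [redN, dif_neg (by omega)]

theorem redN_step (n : Nat) (h : 2 ^ 10 ≤ n) :
    redN n = redN (n ^^^ (1335 <<< (PySem.Int.bitLength (n : Int) - 11))) := by
  rw [redN, dif_pos h]

theorem redN_lt (n : Nat) : redN n < 2 ^ 10 := by
  induction n using Nat.strong_induction_on with
  | _ n ih =>
    by_cases h : 2 ^ 10 ≤ n
    · rw [redN_step n h]
      have h1 := pv_xor_gen_lt n h
      have h2 := pv_two_pow_bl_le n (by omega)
      exact ih _ (by omega)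
    · rw [redN_of_lt n (by omega)]; omega

-- KEY LEMMA: XORing any shifted generator does not change the remainder
theorem redN_xor_gen (n : Nat) : ∀ k, redN (n ^^^ (1335 <<< k)) = redN n := by
  induction n using Nat.strong_induction_on with
  | _ n ih =>
    intro k
    have hGlow : 2 ^ (k + 10) ≤ 1335 <<< k := by
      rw [Nat.shiftLeft_eq, pow_add]
      nlinarith [Nat.two_pow_pos k]
    have hGhigh : 1335 <<< k < 2 ^ (k + 11) := by
      rw [Nat.shiftLeft_eq, pow_add]
      nlinarith [Nat.two_pow_pos k]
    set b := PySem.Int.bitLength (n : Int) with hb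
    rcases lt_trichotomy b (k + 11) with hcase | hcase | hcase
    · -- n below the generator's top bit: one redN step on the XORed value cancels the generator
      have hnlt : n < 2 ^ (k + 10) := (pv_bl_le_iff n (k + 10)).mp (by omega)
      set y := n ^^^ (1335 <<< k) with hy
      have hylt : y < 2 ^ (k + 11) :=
        Nat.xor_lt_two_pow (lt_of_lt_of_le hnlt (Nat.pow_le_pow_right (by norm_num) (by omega))) hGhigh
      have hytop : y.testBit (k + 10) = true := by
        rw [hy, Nat.testBit_xor]
        have h1 : n.testBit (k + 10) = false := Nat.testBit_lt_two_pow hnlt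
        have h2 : (1335 <<< k).testBit (k + 10) = true := by
          rw [Nat.testBit_shiftLeft]
          have hle : k ≤ k + 10 := by omega
          have he : k + 10 - k = 10 := by omega
          simp only [ge_iff_le, he, hle, decide_true, Bool.true_and]
          decide
        simp [h1, h2]
      have hyge : 2 ^ (k + 10) ≤ y := Nat.ge_two_pow_of_testBit hytop
      have hbly : PySem.Int.bitLength (y : Int) = k + 11 := by
        have h1 : PySem.Int.bitLength (y : Int) ≤ k + 11 := (pv_bl_le_iff y (k + 11)).mpr hylt
        have h2 : ¬ PySem.Int.bitLength (y : Int) ≤ k + 10 := by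
          intro hc; have := (pv_bl_le_iff y (k + 10)).mp hc; omega
        omega
      have hy10 : 2 ^ 10 ≤ y :=
        le_trans (Nat.pow_le_pow_right (by norm_num) (by omega)) hyge
      rw [redN_step y hy10, hbly]
      have he : k + 11 - 11 = k := by omega
      rw [he, hy, Nat.xor_xor_cancel_right]
    · -- n's top bit is exactly the generator's: A's own step is this XOR
      have hge : 2 ^ (k + 10) ≤ n := by
        by_contra hc
        have := (pv_bl_le_iff n (k + 10)).mpr (by omega)
        omega
      have h10 : 2 ^ 10 ≤ n :=
        le_trans (Nat.pow_le_pow_right (by norm_num) (by omega)) hge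
      rw [redN_step n h10, ← hb, hcase]
      have he : k + 11 - 11 = k := by omega
      rw [he]
    · -- n strictly longer than the generator: reduce n's top bit on both sides, then IH
      have hn0 : n ≠ 0 := by
        intro h0
        rw [h0] at hb
        simp [PySem.Int.bitLength_zero] at hb
        omega
      have hnb1 : 2 ^ (b - 1) ≤ n := by rw [hb]; exact pv_two_pow_bl_le n hn0
      have hnb : n < 2 ^ b := by rw [hb]; exact pv_lt_two_pow_bl n
      have h10 : 2 ^ 10 ≤ n :=
        le_trans (Nat.pow_le_pow_right (by norm_num) (by omega)) hnb1
      set y := n ^^^ (1335 <<< k) with hy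
      have hGb1 : 1335 <<< k < 2 ^ (b - 1) :=
        lt_of_lt_of_le hGhigh (Nat.pow_le_pow_right (by norm_num) (by omega))
      have hylt : y < 2 ^ b :=
        Nat.xor_lt_two_pow hnb (lt_of_lt_of_le hGb1 (Nat.pow_le_pow_right (by norm_num) (by omega)))
      have hytop : y.testBit (b - 1) = true := by
        rw [hy, Nat.testBit_xor]
        have h1 : n.testBit (b - 1) = true := by
          apply pv_testBit_top n (b - 1) hnb1
          have he : b - 1 + 1 = b := by omega
          rw [he]; exact hnb
        have h2 : (1335 <<< k).testBit (b - 1) = false := Nat.testBit_lt_two_pow hGb1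
        simp [h1, h2]
      have hyge : 2 ^ (b - 1) ≤ y := Nat.ge_two_pow_of_testBit hytop
      have hbly : PySem.Int.bitLength (y : Int) = b := by
        have h1 : PySem.Int.bitLength (y : Int) ≤ b := (pv_bl_le_iff y b).mpr hylt
        have h2 : ¬ PySem.Int.bitLength (y : Int) ≤ b - 1 := by
          intro hc; have := (pv_bl_le_iff y (b - 1)).mp hc; omega
        omega
      have hy10 : 2 ^ 10 ≤ y :=
        le_trans (Nat.pow_le_pow_right (by norm_num) (by omega)) hyge
      have hxlt := pv_xor_gen_lt n h10
      rw [← hb] at hxlt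
      rw [redN_step n h10, ← hb, redN_step y hy10, hbly]
      have hyx : y ^^^ (1335 <<< (b - 11)) = (n ^^^ (1335 <<< (b - 11))) ^^^ (1335 <<< k) := by
        rw [hy, Nat.xor_assoc, Nat.xor_comm (1335 <<< k), ← Nat.xor_assoc]
      rw [hyx]
      exact ih _ (by omega) k

-- the remainder can be taken of the left XOR argument first
theorem redN_xor_left (a : Nat) : ∀ b, redN (a ^^^ b) = redN (redN a ^^^ b) := by
  induction a using Nat.strong_induction_on with
  | _ a ih =>
    intro b
    by_cases h : 2 ^ 10 ≤ a
    · set G := 1335 <<< (PySem.Int.bitLength (a : Int) - 11) with hG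
      have hlt : a ^^^ G < a := by
        have h1 := pv_xor_gen_lt a h
        have h2 := pv_two_pow_bl_le a (by omega)
        rw [← hG] at h1
        omega
      have hab : a ^^^ b = ((a ^^^ G) ^^^ b) ^^^ G := by
        rw [Nat.xor_assoc a G b, Nat.xor_comm G b, ← Nat.xor_assoc a b G,
          Nat.xor_assoc (a ^^^ b) G G, Nat.xor_self, Nat.xor_zero]
      rw [hab, redN_xor_gen, ih _ hlt b, redN_step a h, ← hG]
    · rw [redN_of_lt a (by omega)]

-- full GF(2) linearity of the remainder
theorem redN_linear (x y : Nat) : redN (x ^^^ y) = redN x ^^^ redN y := by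
  rw [redN_xor_left, Nat.xor_comm (redN x) y, redN_xor_left, Nat.xor_comm (redN y)]
  exact redN_of_lt _ (Nat.xor_lt_two_pow (redN_lt x) (redN_lt y))

theorem pv_shl_shl (a m n : Nat) : (a <<< m) <<< n = a <<< (m + n) := by
  simp [Nat.shiftLeft_eq, pow_add, Nat.mul_assoc]

-- shifting commutes with prior reduction
theorem redN_shift (x : Nat) : redN ((redN x) <<< 1) = redN (x <<< 1) := by
  induction x using Nat.strong_induction_on with
  | _ x ih =>
    by_cases h : 2 ^ 10 ≤ x
    · set k := PySem.Int.bitLength (x : Int) - 11 with hk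
      have hlt : x ^^^ (1335 <<< k) < x := by
        have h1 := pv_xor_gen_lt x h
        have h2 := pv_two_pow_bl_le x (by omega)
        rw [← hk] at h1
        omega
      have hx : x = (x ^^^ (1335 <<< k)) ^^^ (1335 <<< k) := by
        rw [Nat.xor_xor_cancel_right]
      have hsh : x <<< 1 = ((x ^^^ (1335 <<< k)) <<< 1) ^^^ (1335 <<< (k + 1)) := by
        conv_lhs => rw [hx]
        rw [Nat.shiftLeft_xor_distrib, pv_shl_shl]
      rw [redN_step x h, ← hk, ih _ hlt, hsh, redN_xor_gen]
    · rw [redN_of_lt x (by omega)]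

-- carry-less multiplication: XOR over the set bits of m of b shifted by the bit position
def clmulN (m b : Nat) : Nat :=
  if m = 0 then 0
  else (if m % 2 = 1 then b else 0) ^^^ clmulN (m / 2) (b <<< 1)
termination_by m
decreasing_by omega

theorem clmulN_zero (b : Nat) : clmulN 0 b = 0 := by rw [clmulN]; simp

theorem clmulN_step (m b : Nat) (h : m ≠ 0) :
    clmulN m b = (if m % 2 = 1 then b else 0) ^^^ clmulN (m / 2) (b <<< 1) := by
  rw [clmulN, if_neg h]

-- the second argument of clmulN may be reduced without changing the remainder
theorem redN_clmulN_redN (m : Nat) : ∀ b, redN (clmulN m (redN b)) = redN (clmulN m b) := by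
  induction m using Nat.strong_induction_on with
  | _ m ih =>
    intro b
    rcases Nat.eq_zero_or_pos m with rfl | hm
    · rw [clmulN_zero, clmulN_zero]
    · rw [clmulN_step m _ (by omega), clmulN_step m b (by omega),
        redN_linear, redN_linear]
      have hhead : redN (if m % 2 = 1 then redN b else 0) = redN (if m % 2 = 1 then b else 0) := by
        by_cases hp : m % 2 = 1
        · rw [if_pos hp, if_pos hp, redN_of_lt (redN b) (redN_lt b)]
        · rw [if_neg hp, if_neg hp]
      rw [hhead]
      have htail : redN (clmulN (m / 2) ((redN b) <<< 1)) = redN (clmulN (m / 2) (b <<< 1)) := by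
        have h1 := ih (m / 2) (by omega) ((redN b) <<< 1)
        have h2 := ih (m / 2) (by omega) (b <<< 1)
        rw [← h1, ← h2, redN_shift]
      rw [htail]

-- clmulN by a power of two is a shift
theorem clmulN_pow2 (m : Nat) : ∀ j, clmulN m (1 <<< j) = m <<< j := by
  induction m using Nat.strong_induction_on with
  | _ m ih =>
    intro j
    rcases Nat.eq_zero_or_pos m with rfl | hm
    · rw [clmulN_zero]; simp [Nat.shiftLeft_eq]
    · rw [clmulN_step m _ (by omega), pv_shl_shl, ih (m / 2) (by omega) (j + 1)]
      apply Nat.eq_of_testBit_eq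
      intro i
      have hhead : ∀ d, ((if m % 2 = 1 then 1 <<< j else 0) : Nat).testBit d =
          (decide (m % 2 = 1) && Nat.testBit 1 (d - j) && decide (j ≤ d)) := by
        intro d
        by_cases hp : m % 2 = 1 <;> simp [hp, Nat.testBit_shiftLeft, Bool.and_comm]
      rcases Nat.lt_or_ge i j with hij | hij
      · simp [Nat.testBit_xor, Nat.testBit_shiftLeft, hhead,
          (show ¬ j ≤ i by omega), (show ¬ j + 1 ≤ i by omega)]
      · rcases Nat.eq_or_lt_of_le hij with heq | hgt
        · have h2 : ((m / 2) <<< (j + 1)).testBit i = false := by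
            rw [Nat.testBit_shiftLeft]
            simp [show ¬ j + 1 ≤ i by omega]
          rw [Nat.testBit_xor, hhead, h2, Nat.testBit_shiftLeft,
            show i - j = 0 from by omega, Nat.testBit_zero]
          simp [show j ≤ i by omega]
        · have hi1 : i - j = (i - (j + 1)) + 1 := by omega
          simp [Nat.testBit_xor, Nat.testBit_shiftLeft, hhead,
            (show j ≤ i by omega), (show j + 1 ≤ i by omega), hi1, Nat.testBit_add_one]

-- B's mathematical sweep over Nat, structurally B's while-loop
def sweepN (info rem basis : Nat) : Nat :=
  if info = 0 then rem
  else
    sweepN (info / 2) (if info % 2 = 1 then rem ^^^ basis else rem)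
      (if (basis <<< 1).testBit 10 then (basis <<< 1) ^^^ 1335 else basis <<< 1)
termination_by info
decreasing_by omega

theorem sweepN_zero (rem basis : Nat) : sweepN 0 rem basis = rem := by rw [sweepN]; simp

theorem sweepN_step (info rem basis : Nat) (h : info ≠ 0) :
    sweepN info rem basis =
      sweepN (info / 2) (if info % 2 = 1 then rem ^^^ basis else rem)
        (if (basis <<< 1).testBit 10 then (basis <<< 1) ^^^ 1335 else basis <<< 1) := by
  rw [sweepN, if_neg h]

-- the basis update is exactly reduction of the shifted basis
theorem pv_basis_update (basis : Nat) (h : basis < 2 ^ 10) :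
    (if (basis <<< 1).testBit 10 then (basis <<< 1) ^^^ 1335 else basis <<< 1) =
      redN (basis <<< 1) := by
  have hlt : basis <<< 1 < 2 ^ 11 := by
    rw [Nat.shiftLeft_eq]
    calc basis * 2 ^ 1 < 2 ^ 10 * 2 ^ 1 := by
          exact Nat.mul_lt_mul_of_lt_of_le h (le_refl _) (by norm_num)
      _ = 2 ^ 11 := by norm_num
  by_cases hbit : (basis <<< 1).testBit 10
  · rw [if_pos hbit]
    have hge : 2 ^ 10 ≤ basis <<< 1 := Nat.ge_two_pow_of_testBit hbit
    have hbl : PySem.Int.bitLength ((basis <<< 1 : Nat) : Int) = 11 := by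
      have h1 : PySem.Int.bitLength ((basis <<< 1 : Nat) : Int) ≤ 11 :=
        (pv_bl_le_iff _ 11).mpr hlt
      have h2 : ¬ PySem.Int.bitLength ((basis <<< 1 : Nat) : Int) ≤ 10 := by
        intro hc; have := (pv_bl_le_iff _ 10).mp hc; omega
      omega
    rw [redN_step _ hge, hbl]
    have h0 : (1335 : Nat) <<< (11 - 11) = 1335 := by norm_num
    rw [h0]
    have hred : (basis <<< 1) ^^^ 1335 < 2 ^ 10 := by
      have := pv_xor_gen_lt (basis <<< 1) hge
      rw [hbl] at this
      simpa [h0] using this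
    rw [redN_of_lt _ hred]
  · rw [if_neg hbit]
    have hsm : basis <<< 1 < 2 ^ 10 :=
      pv_testBit_false_lt _ 10 (by simpa using hbit) hlt
    rw [redN_of_lt _ hsm]

-- sweep invariant: the accumulator collects the remainder of clmulN info basis
theorem sweepN_invariant (info : Nat) : ∀ rem basis, basis < 2 ^ 10 →
    sweepN info rem basis = rem ^^^ redN (clmulN info basis) := by
  induction info using Nat.strong_induction_on with
  | _ info ih =>
    intro rem basis hb
    rcases Nat.eq_zero_or_pos info with rfl | hpos
    · rw [sweepN_zero, clmulN_zero, redN_of_lt 0 (by norm_num), Nat.xor_zero]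
    · rw [sweepN_step info rem basis (by omega), pv_basis_update basis hb]
      rw [ih (info / 2) (by omega) _ _ (redN_lt _)]
      rw [redN_clmulN_redN, clmulN_step info basis (by omega), redN_linear]
      by_cases hp : info % 2 = 1
      · rw [if_pos hp, if_pos hp, redN_of_lt basis hb, Nat.xor_assoc]
      · rw [if_neg hp, if_neg hp, redN_of_lt 0 (by norm_num), Nat.zero_xor]

-- B's cast bridge: the Int-level fueled loop computes sweepN
theorem pv_sweepAux_eq (fuel : Nat) : ∀ (n rem basis : Nat), n < 2 ^ fuel →
    sweepAux fuel (n : Int) (rem : Int) (basis : Int) = (sweepN n rem basis : Int) := by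
  induction fuel with
  | zero =>
    intro n rem basis h
    interval_cases n
    simp [sweepAux, sweepN_zero]
  | succ f ihf =>
    intro n rem basis h
    rcases Nat.eq_zero_or_pos n with rfl | hpos
    · simp [sweepAux, sweepN_zero]
    · have hne : (n : Int) ≠ 0 := by exact_mod_cast hpos.ne'
      rw [sweepAux, if_pos hne]
      dsimp only
      have hb1 : (basis : Int) <<< (1 : Nat) = ((basis <<< 1 : Nat) : Int) := by
        simp [Int.shiftLeft_eq, Nat.shiftLeft_eq]
      have hband1 : PySem.Int.band (n : Int) 1 = ((n % 2 : Nat) : Int) := by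
        have hx := PySem.Int.band_natCast n 1
        rw [Nat.and_one_is_mod] at hx
        exact_mod_cast hx
      have hrem' : (if PySem.Int.band (n : Int) 1 ≠ 0 then PySem.Int.bxor (rem : Int) (basis : Int) else (rem : Int)) =
          (((if n % 2 = 1 then rem ^^^ basis else rem) : Nat) : Int) := by
        rw [hband1]
        by_cases hp : n % 2 = 1
        · rw [if_pos, if_pos hp]
          · exact_mod_cast PySem.Int.bxor_natCast rem basis
          · rw [hp]; norm_num
        · have h0 : n % 2 = 0 := by omega
          rw [h0]
          norm_num
      have hone : ((1 : Int) <<< (10 : Nat)) = ((2 ^ 10 : Nat) : Int) := by decide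
      have hbasis' : (if PySem.Int.band ((basis : Int) <<< (1 : Nat)) ((1 : Int) <<< (10 : Nat)) ≠ 0
            then PySem.Int.bxor ((basis : Int) <<< (1 : Nat)) 1335 else (basis : Int) <<< (1 : Nat)) =
          (((if (basis <<< 1).testBit 10 then (basis <<< 1) ^^^ 1335 else basis <<< 1) : Nat) : Int) := by
        rw [hb1, hone,
          show PySem.Int.band (((basis <<< 1 : Nat)) : Int) (((2 ^ 10 : Nat)) : Int) =
            (((basis <<< 1) &&& 2 ^ 10 : Nat) : Int) from PySem.Int.band_natCast _ _,
          Nat.and_two_pow]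
        by_cases hbit : (basis <<< 1).testBit 10
        · rw [hbit, if_pos, if_pos rfl]
          · exact_mod_cast PySem.Int.bxor_natCast (basis <<< 1) 1335
          · norm_num
        · have hbit' : (basis <<< 1).testBit 10 = false := by simpa using hbit
          rw [hbit']
          simp
      have hshr : (n : Int) >>> (1 : Nat) = ((n / 2 : Nat) : Int) := by
        have hx : (n : Int) >>> (1 : Nat) = ((n >>> 1 : Nat) : Int) := by exact_mod_cast rfl
        rw [hx, Nat.shiftRight_one]
      rw [hrem', hbasis', hshr, ihf (n / 2) _ _ (by omega),
        sweepN_step n rem basis (by omega)]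

-- B's whole loop computes redN
theorem pv_sweep_top (n : Nat) (h : n < 2 ^ 100) :
    sweepAux 100 (n : Int) 0 1 = (redN n : Int) := by
  have h0 : ((0 : Nat) : Int) = 0 := rfl
  have h1 : ((1 : Nat) : Int) = 1 := rfl
  rw [← h0, ← h1, pv_sweepAux_eq 100 n 0 1 h]
  rw [sweepN_invariant n 0 1 (by norm_num)]
  have hc : clmulN n 1 = n := by
    have := clmulN_pow2 n 0
    simpa using this
  rw [hc, Nat.zero_xor]

-- A's fueled binLength computes the bit length for non-negative values with enough fuel
theorem pv_binLengthAux_eq (fuel : Nat) (n : Nat) (h : n < 2 ^ fuel) :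
    binLengthAux fuel (n : Int) = (PySem.Int.bitLength (n : Int) : Int) := by
  induction fuel generalizing n with
  | zero =>
    interval_cases n
    simp [binLengthAux, PySem.Int.bitLength_zero]
  | succ f ih =>
    rcases Nat.eq_zero_or_pos n with rfl | hpos
    · simp [binLengthAux, PySem.Int.bitLength_zero]
    · have hne : (n : Int) ≠ 0 := by exact_mod_cast hpos.ne'
      rw [binLengthAux, if_pos hne]
      have hshift : (n : Int) >>> (1 : Nat) = ((n >>> 1 : Nat) : Int) := by
        exact_mod_cast rfl
      rw [hshift, Nat.shiftRight_one]
      have hlt : n / 2 < 2 ^ f := by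
        have : 2 ^ (f + 1) = 2 * 2 ^ f := by ring
        omega
      rw [ih (n / 2) hlt]
      have hbl : PySem.Int.bitLength (n : Int) =
          PySem.Int.bitLength (PySem.Int.floordiv (n : Int) 2) + 1 :=
        PySem.Int.bitLength_of_pos (by exact_mod_cast hpos)
      have hfd : PySem.Int.floordiv (n : Int) 2 = ((n / 2 : Nat) : Int) := by
        exact_mod_cast PySem.Int.floordiv_natCast n 2
      rw [hbl, hfd]
      push_cast
      ring

-- A's fueled reduction loop computes redN
theorem pv_loopA_eq (fuel : Nat) (n : Nat) (h : n < 2 ^ fuel) (hf : fuel ≤ 100) :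
    confirmFormatLoop fuel (n : Int) (binLength (n : Int)) = (redN n : Int) := by
  induction fuel generalizing n with
  | zero =>
    interval_cases n
    simp [confirmFormatLoop, redN_of_lt 0 (by norm_num)]
  | succ f ih =>
    have hbl : binLength (n : Int) = (PySem.Int.bitLength (n : Int) : Int) :=
      pv_binLengthAux_eq 100 n
        (lt_of_lt_of_le h (Nat.pow_le_pow_right (by norm_num) hf))
    rw [confirmFormatLoop, hbl]
    by_cases hge : 2 ^ 10 ≤ n
    · have h11 : 11 ≤ PySem.Int.bitLength (n : Int) := by
        by_contra hc
        have := (pv_bl_le_iff n 10).mp (by omega)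
        omega
      rw [if_pos (by exact_mod_cast h11)]
      have htn : (((PySem.Int.bitLength (n : Int) : Int) - 11)).toNat =
          PySem.Int.bitLength (n : Int) - 11 := by omega
      have hcast : ((1335 : Int) <<< ((((PySem.Int.bitLength (n : Int) : Int) - 11)).toNat)) =
          ((1335 <<< (PySem.Int.bitLength (n : Int) - 11) : Nat) : Int) := by
        rw [htn, Int.shiftLeft_eq, Nat.shiftLeft_eq]
        push_cast; ring
      rw [hcast,
        show PySem.Int.bxor (n : Int) ((1335 <<< (PySem.Int.bitLength (n : Int) - 11) : Nat) : Int)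
          = ((n ^^^ 1335 <<< (PySem.Int.bitLength (n : Int) - 11) : Nat) : Int) from
          PySem.Int.bxor_natCast n _]
      have hlt' : n ^^^ 1335 <<< (PySem.Int.bitLength (n : Int) - 11) < 2 ^ f := by
        have h1 := pv_xor_gen_lt n hge
        have hblle : PySem.Int.bitLength (n : Int) ≤ f + 1 := (pv_bl_le_iff n (f + 1)).mpr h
        have h2 : 2 ^ (PySem.Int.bitLength (n : Int) - 1) ≤ 2 ^ f :=
          Nat.pow_le_pow_right (by norm_num) (by omega)
        omega
      rw [ih _ hlt' (by omega), redN_step n hge]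
    · have h10 : PySem.Int.bitLength (n : Int) ≤ 10 := (pv_bl_le_iff n 10).mpr (by omega)
      have hnot : ¬ (11 : Int) ≤ (PySem.Int.bitLength (n : Int) : Int) := by
        exact_mod_cast (by omega : ¬ (11 : Nat) ≤ PySem.Int.bitLength (n : Int))
      rw [if_neg hnot, redN_of_lt n (by omega)]

-- binaryFromBitlist on a non-negative, 2^32-bounded bitlist: non-negative and bounded
theorem pv_bfb_bound (l : List Int) (acc : Int) (k : Nat) (hk : 32 ≤ k)
    (hacc : 0 ≤ acc) (haccb : acc < 2 ^ k)
    (hl : ∀ x ∈ l, 0 ≤ x ∧ x < 2 ^ 32) :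
    0 ≤ l.foldl (fun out bit => PySem.Int.bor (out <<< (1 : Nat)) bit) acc ∧
      l.foldl (fun out bit => PySem.Int.bor (out <<< (1 : Nat)) bit) acc < 2 ^ (k + l.length) := by
  induction l generalizing acc k with
  | nil => simpa using ⟨hacc, haccb⟩
  | cons x xs ih =>
    obtain ⟨hx0, hxb⟩ := hl x List.mem_cons_self
    rw [List.foldl_cons]
    have hsh : acc <<< (1 : Nat) = acc * 2 := by rw [Int.shiftLeft_eq]; ring
    have hcast1 : ((2 ^ (k + 1) : Nat) : Int) = (2 : Int) ^ (k + 1) := by push_cast; try ring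
    have hcastk : ((2 ^ k : Nat) : Int) = (2 : Int) ^ k := by push_cast; try ring
    have hcast32 : ((2 ^ 32 : Nat) : Int) = (2 : Int) ^ 32 := by push_cast; try ring
    have hor : PySem.Int.bor (acc <<< (1 : Nat)) x =
        (((acc * 2).toNat ||| x.toNat : Nat) : Int) := by
      rw [hsh]
      exact PySem.Int.bor_of_nonneg (by omega) hx0
    have hA : (acc * 2).toNat < 2 ^ (k + 1) := by
      have h2 : acc * 2 < (2 : Int) ^ (k + 1) := by
        have he : (2 : Int) ^ (k + 1) = 2 ^ k * 2 := by ring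
        rw [he]
        exact mul_lt_mul_of_pos_right haccb (by norm_num)
      omega
    have hB : x.toNat < 2 ^ (k + 1) := by
      have hx32 : x.toNat < 2 ^ 32 := by omega
      exact lt_of_lt_of_le hx32 (Nat.pow_le_pow_right (by norm_num) (by omega))
    have hornat : (acc * 2).toNat ||| x.toNat < 2 ^ (k + 1) := Nat.or_lt_two_pow hA hB
    have hres := ih (((acc * 2).toNat ||| x.toNat : Nat) : Int) (k + 1)
      (by omega) (by positivity) (by omega) (fun y hy => hl y (List.mem_cons_of_mem x hy))

    rw [hor]
    refine ⟨hres.1, ?_⟩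
    have hlen : k + 1 + xs.length = k + (x :: xs).length := by
      rw [List.length_cons]
      omega
    rw [← hlen]
    exact hres.2

theorem pv_slice05 (format : List Int) :
    PySem.List.slice format (some 0) (some 5) = format.take 5 := by
  simp [pysem]

-- ===== VERDICT (by name: the statement is the Claim_ definition above) =====
theorem confirmFormat_spec : Claim_equal_confirmFormat := by
  intro format hdom hpre
  unfold Spec_confirmFormat confirmFormat confirmFormat_alt
  dsimp only
  set info0 := binaryFromBitlist (PySem.List.slice format (some 0) (some 5)) with hinfo0
  have hbounds : 0 ≤ info0 ∧ info0 < 2 ^ 37 := by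
    rw [hinfo0, pv_slice05]
    unfold binaryFromBitlist
    have h := pv_bfb_bound (format.take 5) 0 32 (by norm_num) (by norm_num) (by norm_num)
      (fun x hx => by
        refine ⟨hpre x hx, ?_⟩
        have hx' : x ∈ format := List.mem_of_mem_take hx
        unfold Dom_confirmFormat at hdom
        rw [List.all_eq_true] at hdom
        have := hdom x hx'
        unfold pvDomInt at this
        simp at this
        have h32 : (2147483648 : Int) < 2 ^ 32 := by norm_num
        omega)
    refine ⟨h.1, lt_of_lt_of_le h.2 ?_⟩
    have hlen : (format.take 5).length ≤ 5 := by simp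
    exact pow_le_pow_right₀ (by norm_num) (by omega)
  obtain ⟨m, hm, hmlt⟩ : ∃ m : Nat, info0 <<< (10 : Nat) = (m : Int) ∧ m < 2 ^ 47 := by
    have hsh : info0 <<< (10 : Nat) = info0 * 1024 := by
      rw [Int.shiftLeft_eq]; norm_num
    have hb2 : info0 < 137438953472 := by
      have h37 := hbounds.2
      norm_num at h37
      exact h37
    have h2 : info0 * 1024 < 140737488355328 := by omega
    refine ⟨(info0 * 1024).toNat, by rw [hsh]; omega, ?_⟩
    have hp : (2 : Nat) ^ 47 = 140737488355328 := by norm_num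
    omega
  rw [hm]
  rw [pv_loopA_eq 100 m (lt_of_lt_of_le hmlt (Nat.pow_le_pow_right (by norm_num) (by norm_num)))
    (by norm_num)]
  rw [pv_sweep_top m (lt_of_lt_of_le hmlt (Nat.pow_le_pow_right (by norm_num) (by norm_num)))]
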